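-- pv_equiv track=rewrite | github.com/dev-comakers/Domostav | mzdovy/payroll/exporter.py | _sort_projects
-- ===== SOURCE A (Python) =====
-- PROJECT_ORDER_HINT = [
--     "BACK OFFICE",
--     "LEFT OF",
--     "LEFT OFF",
--     "LEFT OFFICE",
--     "PALMA",
--     "OK-BE",
--     "HELP",
--     "Instalace",
--     "Stavba",
--     "Elektro",
--     "Domostav",
--     "Domostav/ HPP",
--     "Domostav / HPP",
-- ]
--
-- def _sort_projects(projects) -> list[str]:
--     def rank(p: str) -> tuple[int, str]:
--         low = p.lower()
--         for idx, hint in enumerate(PROJECT_ORDER_HINT):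
--             if low.startswith(hint.lower()):
--                 return (idx, low)
--         return (len(PROJECT_ORDER_HINT), low)
--
--     return sorted(projects, key=rank)
-- ===== SOURCE B (Python) =====
-- PROJECT_ORDER_HINT = [
--     "BACK OFFICE",
--     "LEFT OF",
--     "LEFT OFF",
--     "LEFT OFFICE",
--     "PALMA",
--     "OK-BE",
--     "HELP",
--     "Instalace",
--     "Stavba",
--     "Elektro",
--     "Domostav",
--     "Domostav/ HPP",
--     "Domostav / HPP",
-- ]
--
-- _HINTS_LOWER = [h.lower() for h in PROJECT_ORDER_HINT]
--
--
-- def _rank_low(low):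
--     i = 0
--     for h in _HINTS_LOWER:
--         if low.startswith(h):
--             return i
--         i += 1
--     return i
--
--
-- def _sort_projects(projects) -> list[str]:
--     # bucket by hint rank in original order, then sort each bucket by lowercase alone
--     buckets = [[] for _ in range(len(_HINTS_LOWER) + 1)]
--     for p in projects:
--         buckets[_rank_low(p.lower())].append(p)
--     out = []
--     for b in buckets:
--         out += sorted(b, key=str.lower)
--     return out
-- ===== Notes on version B (the rewrite author's own statement) =====
-- stated objective: alternative
-- what changed: Replaces the single comparison sort with (rank, lowercase) tuple keys by a one-pass distribution of the original list into rank buckets (rank computed by a counter loop over pre-lowered hints) followed by a stable sort of each bucket by lowercase name alone, concatenated in ascending rank order.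
import Mathlib
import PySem

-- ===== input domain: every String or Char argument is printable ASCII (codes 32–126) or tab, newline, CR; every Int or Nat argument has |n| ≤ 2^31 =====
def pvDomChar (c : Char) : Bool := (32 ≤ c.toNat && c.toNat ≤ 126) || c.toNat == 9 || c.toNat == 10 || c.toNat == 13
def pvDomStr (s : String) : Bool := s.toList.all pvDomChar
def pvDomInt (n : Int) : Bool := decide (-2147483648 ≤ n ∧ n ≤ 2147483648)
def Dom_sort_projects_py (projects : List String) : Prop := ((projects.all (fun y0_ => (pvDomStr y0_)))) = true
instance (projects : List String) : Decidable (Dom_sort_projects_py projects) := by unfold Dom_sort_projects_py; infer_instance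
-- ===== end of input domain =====

-- B replaces A's single comparison sort on (rank, lowercase) tuple keys by rank-bucketing the
-- original list in one pass and stably sorting each bucket by lowercase alone (objective: alternative).

-- ===== PORT A =====
def PROJECT_ORDER_HINT : List String :=
  ["BACK OFFICE", "LEFT OF", "LEFT OFF", "LEFT OFFICE", "PALMA", "OK-BE", "HELP",
   "Instalace", "Stavba", "Elektro", "Domostav", "Domostav/ HPP", "Domostav / HPP"]

-- A's inner `rank` loop: first matching hint index, else len(PROJECT_ORDER_HINT)
def rankGo (low : String) : List (Int × String) → Int
  | [] => (PROJECT_ORDER_HINT.length : Int)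
  | (idx, hint) :: rest =>
      if PySem.Str.startswith low (PySem.Str.lower hint) then idx else rankGo low rest

def rankKey (p : String) : Int :=
  rankGo (PySem.Str.lower p) (PySem.List.enumerate PROJECT_ORDER_HINT 0)

-- sorted(projects, key=rank) with rank p = (idx, p.lower())
def sort_projects_py (projects : List String) : List String :=
  PySem.List.sorted2 projects rankKey (fun p => PySem.Str.lower p)

-- ===== PORT B =====
-- _HINTS_LOWER = [h.lower() for h in PROJECT_ORDER_HINT]
def HINTS_LOWER : List String := PROJECT_ORDER_HINT.map PySem.Str.lower

-- _rank_low: counter loop over the pre-lowered hints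
def rankLowGo (low : String) (i : Int) : List String → Int
  | [] => i
  | h :: t => if PySem.Str.startswith low h then i else rankLowGo low (i + 1) t

-- _rank_low's result is provably in [0, len(_HINTS_LOWER)], so the non-negative Python
-- bucket index is exactly .toNat here
def sort_projects_py_alt (projects : List String) : List String :=
  let buckets := projects.foldl
    (fun bs p =>
      let r := (rankLowGo (PySem.Str.lower p) 0 HINTS_LOWER).toNat
      bs.set r (bs.getD r [] ++ [p]))
    (List.replicate (HINTS_LOWER.length + 1) [])
  buckets.foldl (fun out b => out ++ PySem.List.sorted b (fun p => PySem.Str.lower p)) []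

-- ===== PRECONDITION & SPEC =====
def Spec_sort_projects_py (projects : List String) (out : List String) : Prop := out = sort_projects_py_alt projects
instance (projects : List String) (out : List String) : Decidable (Spec_sort_projects_py projects out) := by unfold Spec_sort_projects_py; infer_instance

-- ===== CLAIM (what is proved, stated in full; the proofs are below) =====
def Claim_equal_sort_projects_py : Prop := ∀ (projects : List String), Dom_sort_projects_py projects → Spec_sort_projects_py projects (sort_projects_py projects)

-- ===== LEMMAS AND PROOFS =====

def pyLt2 {α κ₁ κ₂ : Type} [LT κ₁] [DecidableLT κ₁] [LT κ₂] [DecidableLT κ₂]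
    (k1 : α → κ₁) (k2 : α → κ₂) (a b : α) : Bool :=
  decide (k1 a < k1 b) || (!decide (k1 b < k1 a) && decide (k2 a < k2 b))

theorem sorted2_snoc {α κ₁ κ₂ : Type} [LT κ₁] [DecidableLT κ₁] [LT κ₂] [DecidableLT κ₂]
    (k1 : α → κ₁) (k2 : α → κ₂) (xs : List α) (x : α) :
    PySem.List.sorted2 (xs ++ [x]) k1 k2 =
      PySem.List.insertBy (pyLt2 k1 k2) x (PySem.List.sorted2 xs k1 k2) := by
  simp only [PySem.List.sorted2, List.foldl_append]
  rfl

theorem sorted_snoc {α κ : Type} [LT κ] [DecidableLT κ] (k : α → κ) (xs : List α) (x : α) :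
    PySem.List.sorted (xs ++ [x]) k =
      PySem.List.insertBy (fun a b => decide (k a < k b)) x (PySem.List.sorted xs k) := by
  simp [PySem.List.sorted, List.foldl_append]

theorem insertBy_append_left {α : Type} (b : α → α → Bool) (x : α) (l1 l2 : List α)
    (h : ∀ y ∈ l1, b x y = false) :
    PySem.List.insertBy b x (l1 ++ l2) = l1 ++ PySem.List.insertBy b x l2 := by
  induction l1 with
  | nil => simp
  | cons a l ih =>
      simp only [List.cons_append, PySem.List.insertBy, h a (by simp)]
      simp only [Bool.false_eq_true, if_false, List.cons.injEq, true_and]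
      exact ih (fun y hy => h y (by simp [hy]))

theorem insertBy_all_true {α : Type} (b : α → α → Bool) (x : α) (l : List α)
    (h : ∀ y ∈ l, b x y = true) :
    PySem.List.insertBy b x l = x :: l := by
  cases l with
  | nil => rfl
  | cons a t => simp [PySem.List.insertBy, h a (by simp)]

theorem insertBy_eq_tw_dw {α : Type} (b : α → α → Bool) (x : α) (l : List α) :
    PySem.List.insertBy b x l =
      l.takeWhile (fun y => !b x y) ++ x :: l.dropWhile (fun y => !b x y) := by
  induction l with
  | nil => rfl
  | cons a t ih =>
      by_cases hb : b x a
      · simp [PySem.List.insertBy, hb]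
      · simp [PySem.List.insertBy, hb, ih]

theorem tw_dw_filter {α : Type} (p : α → Bool) (Rel : α → α → Prop)
    (hmono : ∀ a b, Rel a b → p a = false → p b = false) :
    ∀ l : List α, l.Pairwise Rel →
      l.takeWhile p = l.filter p ∧ l.dropWhile p = l.filter (fun y => !p y) := by
  intro l hl
  induction l with
  | nil => simp
  | cons a t ih =>
      obtain ⟨ha, ht⟩ := List.pairwise_cons.mp hl
      by_cases hpa : p a = true
      · simp [hpa, ih ht]
      · have hpa' : p a = false := by simpa using hpa
        have hall : ∀ y ∈ t, p y = false := fun y hy => hmono a y (ha y hy) hpa'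
        constructor
        · rw [List.takeWhile_cons_of_neg (by simp [hpa'])]
          symm; rw [List.filter_eq_nil_iff]
          intro y hy
          rcases List.mem_cons.mp hy with h | h
          · simp [h, hpa']
          · simp [hall y h]
        · rw [List.dropWhile_cons_of_neg (by simp [hpa']), List.filter_cons]
          simp only [hpa', Bool.not_false]
          rw [if_pos trivial, List.cons.injEq]
          refine ⟨rfl, ?_⟩
          symm; rw [List.filter_eq_self]
          intro y hy; simp [hall y hy]

theorem comm_filter {α : Type} (l : List α) (p q : α → Bool) :
    (l.filter q).filter p = (l.filter p).filter q := by
  rw [List.filter_filter, List.filter_filter]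
  exact List.filter_congr (fun a _ => Bool.and_comm _ _)

-- A's tuple-key sort decomposes into rank buckets of the lowercase-sorted list
theorem sorted2_eq_buckets {α κ₂ : Type} [LinearOrder κ₂] (k1 : α → Int) (k2 : α → κ₂)
    (R : List Int) (hR : R.Pairwise (· < ·)) (xs : List α) (hmem : ∀ a ∈ xs, k1 a ∈ R) :
    PySem.List.sorted2 xs k1 k2 =
      (R.map (fun r => (PySem.List.sorted xs k2).filter (fun a => decide (k1 a = r)))).flatten := by
  induction xs using List.reverseRecOn with
  | nil => simp [PySem.List.sorted2, PySem.List.sorted]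
  | append_singleton xs x ih =>
    have hmem' : ∀ a ∈ xs, k1 a ∈ R := fun a ha => hmem a (by simp [ha])
    have hx : k1 x ∈ R := hmem x (by simp)
    have hys : (PySem.List.sorted xs k2).Pairwise (fun a b => k2 a ≤ k2 b) :=
      PySem.List.sorted_pairwise xs k2
    set ys := PySem.List.sorted xs k2 with hys_def
    set q : α → Bool := fun y => !decide (k2 x < k2 y) with hq_def
    have hqf : ∀ y : α, q y = false ↔ k2 x < k2 y := by intro y; simp [hq_def]
    have hqt : ∀ y : α, q y = true ↔ ¬ k2 x < k2 y := by intro y; simp [hq_def]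
    have hmono : ∀ a b : α, k2 a ≤ k2 b → q a = false → q b = false := by
      intro a b hab ha
      exact (hqf b).mpr (lt_of_lt_of_le ((hqf a).mp ha) hab)
    set bucket : Int → List α := fun r => ys.filter (fun a => decide (k1 a = r)) with hb_def
    have hbmem : ∀ r, ∀ y ∈ bucket r, k1 y = r := by
      intro r y hy
      have := (List.mem_filter.mp hy).2
      simpa using this
    obtain ⟨R1, R2, hsplit⟩ := List.append_of_mem hx
    rw [hsplit] at hR
    obtain ⟨hR1, hR2c, hcross⟩ := List.pairwise_append.mp hR
    have h1 : ∀ r ∈ R1, r < k1 x := fun r hr => hcross r hr (k1 x) (by simp)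
    have h2 : ∀ r ∈ R2, k1 x < r := (List.pairwise_cons.mp hR2c).1
    have hys_split : ys = ys.filter q ++ ys.filter (fun y => !q y) := by
      obtain ⟨htw, hdw⟩ := tw_dw_filter q (fun a b => k2 a ≤ k2 b) hmono ys hys
      rw [← htw, ← hdw, List.takeWhile_append_dropWhile]
    have hB_pairwise : (bucket (k1 x)).Pairwise (fun a b => k2 a ≤ k2 b) :=
      hys.sublist List.filter_sublist
    have hBsplit : bucket (k1 x) =
        (bucket (k1 x)).filter q ++ (bucket (k1 x)).filter (fun y => !q y) := by
      obtain ⟨htw, hdw⟩ := tw_dw_filter q (fun a b => k2 a ≤ k2 b) hmono _ hB_pairwise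
      rw [← htw, ← hdw, List.takeWhile_append_dropWhile]
    rw [sorted2_snoc, ih hmem', hsplit, List.map_append, List.map_cons, List.flatten_append,
        List.flatten_cons]
    rw [sorted_snoc, insertBy_eq_tw_dw (fun a b => decide (k2 a < k2 b)) x ys]
    have hpred : (fun y => !(fun a b => decide (k2 a < k2 b)) x y) = q := by
      funext y; simp [hq_def]
    rw [hpred]
    obtain ⟨htw, hdw⟩ := tw_dw_filter q (fun a b => k2 a ≤ k2 b) hmono ys hys
    rw [htw, hdw, List.map_append, List.map_cons, List.flatten_append, List.flatten_cons]
    have hside : ∀ r : Int, ¬ k1 x = r →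
        (ys.filter q ++ x :: ys.filter fun y => !q y).filter (fun a => decide (k1 a = r)) =
          bucket r := by
      intro r hr
      rw [List.filter_append, List.filter_cons]
      simp only [decide_eq_true_eq, hr, if_false]
      rw [← List.filter_append, ← hys_split]
    have hmapR1 : (R1.map fun r =>
          (ys.filter q ++ x :: ys.filter fun y => !q y).filter fun a => decide (k1 a = r)) =
        R1.map bucket :=
      List.map_congr_left (fun r hr => hside r (by have := h1 r hr; omega))
    have hmapR2 : (R2.map fun r =>
          (ys.filter q ++ x :: ys.filter fun y => !q y).filter fun a => decide (k1 a = r)) =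
        R2.map bucket :=
      List.map_congr_left (fun r hr => hside r (by have := h2 r hr; omega))
    rw [hmapR1, hmapR2]
    have hcenter : (ys.filter q ++ x :: ys.filter fun y => !q y).filter
          (fun a => decide (k1 a = k1 x)) =
        (bucket (k1 x)).filter q ++ x :: (bucket (k1 x)).filter (fun y => !q y) := by
      rw [List.filter_append, List.filter_cons]
      simp only [decide_eq_true_eq]
      rw [hb_def]
      rw [comm_filter ys (fun a => decide (k1 a = k1 x)) q,
          comm_filter ys (fun a => decide (k1 a = k1 x)) (fun y => !q y)]
      simp
    rw [hcenter]
    have hltL1 : ∀ y ∈ (R1.map bucket).flatten, pyLt2 k1 k2 x y = false := by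
      intro y hy
      rw [List.mem_flatten] at hy
      obtain ⟨l, hl, hyl⟩ := hy
      rw [List.mem_map] at hl
      obtain ⟨r, hr, rfl⟩ := hl
      have hk : k1 y = r := hbmem r y hyl
      have hlt : k1 y < k1 x := by have := h1 r hr; omega
      have h' : ¬ k1 x < k1 y := by omega
      simp [pyLt2, h', hlt]
    have hltBq : ∀ y ∈ (bucket (k1 x)).filter q, pyLt2 k1 k2 x y = false := by
      intro y hy
      obtain ⟨hyb, hyq⟩ := List.mem_filter.mp hy
      have hk : k1 y = k1 x := hbmem _ y hyb
      have hk2 : ¬ k2 x < k2 y := (hqt y).mp hyq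
      simp [pyLt2, hk, hk2]
    have hltRest : ∀ y ∈ (bucket (k1 x)).filter (fun y => !q y) ++ (R2.map bucket).flatten,
        pyLt2 k1 k2 x y = true := by
      intro y hy
      rcases List.mem_append.mp hy with hy | hy
      · obtain ⟨hyb, hyq⟩ := List.mem_filter.mp hy
        have hk : k1 y = k1 x := hbmem _ y hyb
        have hk2 : k2 x < k2 y := by
          rw [Bool.not_eq_eq_eq_not] at hyq
          exact (hqf y).mp (by simpa using hyq)
        simp [pyLt2, hk, hk2]
      · rw [List.mem_flatten] at hy
        obtain ⟨l, hl, hyl⟩ := hy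
        rw [List.mem_map] at hl
        obtain ⟨r, hr, rfl⟩ := hl
        have hk : k1 y = r := hbmem r y hyl
        have hlt : k1 x < k1 y := by have := h2 r hr; omega
        simp [pyLt2, hlt]
    rw [insertBy_append_left _ _ _ _ hltL1, hBsplit, List.append_assoc,
        insertBy_append_left _ _ _ _ hltBq, insertBy_all_true _ _ _ hltRest]
    simp

-- B's counter-loop rank coincides with A's enumerate-loop rank
theorem rankLowGo_eq_rankGo (low : String) :
    ∀ (hs : List String) (i : Int), i + hs.length = (PROJECT_ORDER_HINT.length : Int) →
      rankLowGo low i (hs.map PySem.Str.lower) = rankGo low (PySem.List.enumerate hs i) := by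
  intro hs
  induction hs with
  | nil =>
      intro i hi
      simp only [List.length_nil, Int.natCast_zero, add_zero] at hi
      simp [rankLowGo, rankGo, PySem.List.enumerate_nil, hi]
  | cons h t ih =>
      intro i hi
      rw [PySem.List.enumerate_cons]
      simp only [List.map_cons, rankLowGo, rankGo]
      split_ifs
      · rfl
      · exact ih (i + 1) (by simp at hi ⊢; omega)

theorem rankLow_eq_rankKey (p : String) :
    rankLowGo (PySem.Str.lower p) 0 HINTS_LOWER = rankKey p := by
  unfold HINTS_LOWER rankKey
  exact rankLowGo_eq_rankGo (PySem.Str.lower p) PROJECT_ORDER_HINT 0 (by rfl)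

theorem rankGo_bounds (e : List (Int × String)) (he : ∀ q ∈ e, 0 ≤ q.1 ∧ q.1 ≤ 13) (low : String) :
    0 ≤ rankGo low e ∧ rankGo low e ≤ 13 := by
  induction e with
  | nil =>
      have hlen : (PROJECT_ORDER_HINT.length : Int) = 13 := by rfl
      simp [rankGo, hlen]
  | cons q rest ih =>
      obtain ⟨idx, hint⟩ := q
      simp only [rankGo]
      split_ifs
      · exact he (idx, hint) (by simp)
      · exact ih (fun q hq => he q (by simp [hq]))

theorem rank_bounds (p : String) : 0 ≤ rankKey p ∧ rankKey p ≤ 13 := by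
  have he : PySem.List.enumerate PROJECT_ORDER_HINT 0 =
      [(0, "BACK OFFICE"), (1, "LEFT OF"), (2, "LEFT OFF"), (3, "LEFT OFFICE"), (4, "PALMA"),
       (5, "OK-BE"), (6, "HELP"), (7, "Instalace"), (8, "Stavba"), (9, "Elektro"),
       (10, "Domostav"), (11, "Domostav/ HPP"), (12, "Domostav / HPP")] := by rfl
  unfold rankKey
  rw [he]
  apply rankGo_bounds
  intro q hq
  fin_cases hq <;> norm_num

-- a stable sort commutes with filtering
theorem sorted_filter_comm {α κ : Type} [LinearOrder κ] (k : α → κ) (q : α → Bool)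
    (xs : List α) :
    PySem.List.sorted (xs.filter q) k = (PySem.List.sorted xs k).filter q := by
  induction xs using List.reverseRecOn with
  | nil => simp [PySem.List.sorted]
  | append_singleton xs x ih =>
    have hys : (PySem.List.sorted xs k).Pairwise (fun a b => k a ≤ k b) :=
      PySem.List.sorted_pairwise xs k
    set s := PySem.List.sorted xs k with hs_def
    set p : α → Bool := fun y => !decide (k x < k y) with hp_def
    have hmono : ∀ a b : α, k a ≤ k b → p a = false → p b = false := by
      intro a b hab ha
      simp only [hp_def, Bool.not_eq_false', decide_eq_true_eq] at ha ⊢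
      exact lt_of_lt_of_le ha hab
    have hfp : (s.filter q).Pairwise (fun a b => k a ≤ k b) :=
      hys.sublist List.filter_sublist
    have hins : ∀ l : List α, l.Pairwise (fun a b => k a ≤ k b) →
        PySem.List.insertBy (fun a b => decide (k a < k b)) x l =
          l.filter p ++ x :: l.filter (fun y => !p y) := by
      intro l hl
      obtain ⟨htw, hdw⟩ := tw_dw_filter p (fun a b => k a ≤ k b) hmono l hl
      rw [insertBy_eq_tw_dw]
      have : (fun y => !(fun a b => decide (k a < k b)) x y) = p := by
        funext y; simp [hp_def]
      rw [this, htw, hdw]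
    have hRHS : (PySem.List.sorted (xs ++ [x]) k).filter q =
        (s.filter p).filter q ++ (if q x then [x] else []) ++ (s.filter (fun y => !p y)).filter q := by
      rw [sorted_snoc, hins s hys, List.filter_append, List.filter_cons]
      by_cases hq : q x
      · rw [if_pos hq, if_pos hq]
        simp [List.append_assoc]
      · rw [if_neg hq, if_neg hq]
        simp
    by_cases hq : q x
    · have hLHS : (xs ++ [x]).filter q = xs.filter q ++ [x] := by
        rw [List.filter_append, List.filter_cons, if_pos hq]
        simp
      rw [hLHS, sorted_snoc, ih, hins (s.filter q) hfp, hRHS, if_pos hq]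
      rw [comm_filter s p q, comm_filter s (fun y => !p y) q]
      simp
    · have hLHS : (xs ++ [x]).filter q = xs.filter q := by
        rw [List.filter_append, List.filter_cons, if_neg hq]
        simp
      rw [hLHS, ih, hRHS, if_neg hq]
      rw [← comm_filter s p q, ← comm_filter s (fun y => !p y) q]
      obtain ⟨htw, hdw⟩ := tw_dw_filter p (fun a b => k a ≤ k b) hmono (s.filter q) hfp
      rw [← htw, ← hdw]
      simp [List.takeWhile_append_dropWhile]

theorem foldl_bump {α : Type} (k : α → Nat) (ys : List α) :
    ∀ bs : List (List α), (∀ p ∈ ys, k p < bs.length) →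
      ys.foldl (fun bs p => bs.set (k p) (bs.getD (k p) [] ++ [p])) bs =
        bs.mapIdx (fun i b => b ++ ys.filter (fun p => k p == i)) := by
  induction ys with
  | nil =>
      intro bs _
      apply List.ext_getElem (by simp)
      intro i h1 h2
      simp
  | cons y t ih =>
      intro bs hlen
      have hky : k y < bs.length := hlen y (by simp)
      rw [List.foldl_cons, ih _ (by intro p hp; simpa using hlen p (by simp [hp]))]
      apply List.ext_getElem (by simp)
      intro i h1 h2
      simp only [List.getElem_mapIdx, List.getElem_set]
      by_cases hi : k y = i
      · subst hi
        rw [if_pos rfl, List.getD_eq_getElem _ _ hky, List.filter_cons]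
        simp [List.append_assoc]
      · rw [if_neg hi, List.filter_cons]
        have : (k y == i) = false := by simpa using hi
        simp [this]

theorem mapIdx_replicate {α β : Type} (n : Nat) (c : α) (f : Nat → α → β) :
    (List.replicate n c).mapIdx f = (List.range n).map (fun i => f i c) := by
  apply List.ext_getElem (by simp)
  intro i h1 h2
  simp

theorem foldl_append_map {α β : Type} (f : α → List β) (bs : List α) :
    ∀ acc : List β, bs.foldl (fun out b => out ++ f b) acc = acc ++ (bs.map f).flatten := by
  induction bs with
  | nil => intro acc; simp
  | cons b t ih => intro acc; rw [List.foldl_cons, ih]; simp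

set_option maxHeartbeats 2000000 in
theorem sort_projects_py_eq (projects : List String) :
    sort_projects_py projects = sort_projects_py_alt projects := by
  have hR : ((List.range 14).map (fun n : Nat => (n : Int))).Pairwise (· < ·) := by
    rw [List.pairwise_map]
    exact (List.pairwise_lt_range).imp (by intro a b h; exact_mod_cast h)
  have hmem : ∀ a ∈ projects, rankKey a ∈ (List.range 14).map (fun n : Nat => (n : Int)) := by
    intro a _
    obtain ⟨h0, h13⟩ := rank_bounds a
    rw [List.mem_map]
    exact ⟨(rankKey a).toNat, by rw [List.mem_range]; omega, by omega⟩
  have hA := sorted2_eq_buckets rankKey (fun p => PySem.Str.lower p)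
    ((List.range 14).map (fun n : Nat => (n : Int))) hR projects hmem
  show PySem.List.sorted2 projects rankKey (fun p => PySem.Str.lower p) = _
  rw [hA]
  -- B side
  have hrank : ∀ p : String,
      (rankLowGo (PySem.Str.lower p) 0 HINTS_LOWER).toNat = (rankKey p).toNat := by
    intro p; rw [rankLow_eq_rankKey]
  show _ = (projects.foldl
      (fun bs p =>
        bs.set (rankLowGo (PySem.Str.lower p) 0 HINTS_LOWER).toNat
          (bs.getD (rankLowGo (PySem.Str.lower p) 0 HINTS_LOWER).toNat [] ++ [p]))
      (List.replicate (HINTS_LOWER.length + 1) [])).foldl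
      (fun out b => out ++ PySem.List.sorted b (fun p => PySem.Str.lower p)) []
  have hfun : (fun (bs : List (List String)) (p : String) =>
        bs.set (rankLowGo (PySem.Str.lower p) 0 HINTS_LOWER).toNat
          (bs.getD (rankLowGo (PySem.Str.lower p) 0 HINTS_LOWER).toNat [] ++ [p])) =
      (fun bs p => bs.set ((rankKey p).toNat)
          (bs.getD ((rankKey p).toNat) [] ++ [p])) := by
    funext bs p; rw [hrank p]
  rw [hfun]
  have hbuck := foldl_bump (fun p => (rankKey p).toNat) projects
    (List.replicate (HINTS_LOWER.length + 1) [])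
    (by intro p _; obtain ⟨h0, h13⟩ := rank_bounds p
        simp [HINTS_LOWER, PROJECT_ORDER_HINT]; omega)
  rw [hbuck, foldl_append_map, List.nil_append]
  have h14 : HINTS_LOWER.length + 1 = 14 := by rfl
  rw [h14, mapIdx_replicate, List.map_map, List.map_map]
  congr 1
  apply List.map_congr_left
  intro i hi
  show (PySem.List.sorted projects (fun p => PySem.Str.lower p)).filter
        (fun a => decide (rankKey a = (i : Int))) =
      PySem.List.sorted ([] ++ projects.filter (fun p => (rankKey p).toNat == i))
        (fun p => PySem.Str.lower p)
  rw [List.nil_append, sorted_filter_comm]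
  apply List.filter_congr
  intro p _
  obtain ⟨h0, h13⟩ := rank_bounds p
  by_cases hc : rankKey p = (i : Int)
  · simp [hc]
  · simp only [hc, decide_false]
    symm
    simp only [beq_eq_false_iff_ne, ne_eq]
    omega

-- ===== VERDICT (by name: the statement is the Claim_ definition above) =====
theorem sort_projects_py_spec : Claim_equal_sort_projects_py := by
  intro projects _
  unfold Spec_sort_projects_py
  exact sort_projects_py_eq projects
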